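-- pv_equiv track=rewrite | github.com/clmatte/chmmpy_learn | examples/citation/citation.py | oracle
-- ===== SOURCE A (Python) =====
-- def oracle(hidden):
--     """
--     Check if the sequence of hidden variables meets the oracle condition.
--
--     The oracle condition is satisfied if:
--     - The states appear in blocks that do not repeat
--
--     Parameters:
--     - hidden: A list or array of hidden states.
--
--     Returns:
--     - bool: True if the sequence meets the oracle condition, False otherwise.
--     """
--     seen_states = set()
--     seen_states.add(hidden[0])
--     seen_states.add(hidden[1])
--
--     for t1 in range(2, len(hidden)):
--         if hidden[t1] != hidden[t1 - 1]:
--             # Check if the current state has appeared before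
--             if hidden[t1] in seen_states:
--                 return False
--             seen_states.add(hidden[t1])
--     return True
-- ===== SOURCE B (Python) =====
-- def oracle(hidden):
--     # Materialize the block values (first element of each run of equal
--     # consecutive states), then check they are pairwise distinct.
--     blocks = hidden[:1] + [b for a, b in zip(hidden, hidden[1:]) if b != a]
--     return len(blocks) == len(set(blocks))
-- ===== Notes on version B (the rewrite author's own statement) =====
-- stated objective: simpler
-- what changed: B materializes the list of run/block values with a zip-of-adjacent-pairs comprehension and compares its length with the length of its set, replacing A's index loop with an incrementally maintained seen-set and early return.
import Mathlib
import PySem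

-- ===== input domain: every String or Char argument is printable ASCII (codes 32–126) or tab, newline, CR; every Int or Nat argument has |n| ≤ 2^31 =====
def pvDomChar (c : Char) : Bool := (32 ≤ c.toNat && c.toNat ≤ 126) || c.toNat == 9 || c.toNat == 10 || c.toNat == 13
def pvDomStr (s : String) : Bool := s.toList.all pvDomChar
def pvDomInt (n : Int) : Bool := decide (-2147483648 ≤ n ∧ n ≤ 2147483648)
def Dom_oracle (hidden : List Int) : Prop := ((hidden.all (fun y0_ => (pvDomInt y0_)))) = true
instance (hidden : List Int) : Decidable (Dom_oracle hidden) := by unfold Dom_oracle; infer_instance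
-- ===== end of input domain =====

-- B checks that the block values (heads of runs of equal consecutive states) are pairwise
-- distinct by materializing them and comparing count vs distinct count; A scans with a seen-set.

-- ===== PORT A =====
-- the 'for t1 in range(2, len(hidden))' loop with early 'return False'
def oracleLoop (hidden : List Int) (seen : PySem.Set Int) (t1 : Nat) : Bool :=
  if h : t1 < hidden.length then
    if PySem.List.pyGetD hidden (t1 : Int) 0 ≠ PySem.List.pyGetD hidden ((t1 : Int) - 1) 0 then
      if PySem.Set.contains seen (PySem.List.pyGetD hidden (t1 : Int) 0) then
        false
      else
        oracleLoop hidden (PySem.Set.add seen (PySem.List.pyGetD hidden (t1 : Int) 0)) (t1 + 1)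
    else
      oracleLoop hidden seen (t1 + 1)
  else
    true
termination_by hidden.length - t1

def oracle (hidden : List Int) : Bool :=
  -- hidden[0] / hidden[1] raise IndexError when length < 2; Pre_oracle excludes those inputs
  let seen := PySem.Set.add (PySem.Set.add PySem.Set.empty (PySem.List.pyGetD hidden 0 0))
                (PySem.List.pyGetD hidden 1 0)
  oracleLoop hidden seen 2

-- ===== PORT B =====
def oracle_alt (hidden : List Int) : Bool :=
  let blocks := PySem.List.slice hidden none (some 1) ++
    ((hidden.zip (PySem.List.slice hidden (some 1) none)).filterMap
      (fun p => if p.2 ≠ p.1 then some p.2 else none))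
  PySem.List.len blocks == PySem.Set.len (PySem.Set.ofList blocks)

-- ===== PRECONDITION & SPEC =====
-- Pre_ excludes exactly the inputs of length < 2, on which A raises IndexError.
def Pre_oracle (hidden : List Int) : Prop := 2 ≤ hidden.length
instance (hidden : List Int) : Decidable (Pre_oracle hidden) := by unfold Pre_oracle; infer_instance
def pvWitness_oracle : List Int := [1, 2, 2, 3]

def Spec_oracle (hidden : List Int) (out : Bool) : Prop := out = oracle_alt hidden
instance (hidden : List Int) (out : Bool) : Decidable (Spec_oracle hidden out) := by unfold Spec_oracle; infer_instance

-- ===== CLAIM =====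
def Claim_equal_oracle : Prop := ∀ (hidden : List Int), Dom_oracle hidden → Pre_oracle hidden → Spec_oracle hidden (oracle hidden)

-- ===== LEMMAS AND PROOFS =====

-- reference: the list of block values (run heads)
def blocksRec : List Int → List Int
  | [] => []
  | [a] => [a]
  | a :: b :: t => if b ≠ a then a :: blocksRec (b :: t) else blocksRec (b :: t)

-- A-side list-view of the index loop
def loopL (prev : Int) (rest : List Int) (seen : PySem.Set Int) : Bool :=
  match rest with
  | [] => true
  | x :: rest' =>
    if x ≠ prev then
      if PySem.Set.contains seen x then false
      else loopL x rest' (PySem.Set.add seen x)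
    else
      loopL x rest' seen

theorem blocksRec_head : ∀ (r : List Int) (x : Int), ∃ t, blocksRec (x :: r) = x :: t := by
  intro r
  induction r with
  | nil => intro x; exact ⟨[], rfl⟩
  | cons b t ih =>
    intro x
    by_cases hbx : b = x
    · subst hbx
      obtain ⟨u, hu⟩ := ih b
      exact ⟨u, by simp [blocksRec, hu]⟩
    · exact ⟨blocksRec (b :: t), by simp [blocksRec, hbx]⟩

theorem loopL_eq_nodup : ∀ (rest : List Int) (prev : Int) (seen : List Int),
    seen.Nodup → prev ∈ seen →
    loopL prev rest seen = decide ((seen ++ (blocksRec (prev :: rest)).tail).Nodup) := by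
  intro rest
  induction rest with
  | nil => intro prev seen hnd _; simp [loopL, blocksRec, hnd]
  | cons x rest' ih =>
    intro prev seen hnd hprev
    by_cases hxp : x = prev
    · have : blocksRec (prev :: x :: rest') = blocksRec (x :: rest') := by
        simp [blocksRec, hxp]
      rw [this]
      have : loopL prev (x :: rest') seen = loopL x rest' seen := by
        simp [loopL, hxp]
      rw [this]
      exact ih x seen hnd (hxp ▸ hprev)
    · have hblk : blocksRec (prev :: x :: rest') = prev :: blocksRec (x :: rest') := by
        simp [blocksRec, hxp]
      obtain ⟨tl, htl⟩ := blocksRec_head rest' x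
      by_cases hxs : x ∈ seen
      · have : loopL prev (x :: rest') seen = false := by
          simp [loopL, hxp, PySem.Set.contains, hxs]
        rw [this, hblk, htl]
        have : ¬ (seen ++ x :: tl).Nodup := by
          intro hnd'
          have hd := (List.nodup_append.mp hnd').2.2
          exact absurd rfl (hd x hxs x (by simp))
        simp [this]
      · have hadd : PySem.Set.add seen x = seen ++ [x] := by
          unfold PySem.Set.add PySem.Set.contains
          simp [hxs]
        have : loopL prev (x :: rest') seen = loopL x rest' (seen ++ [x]) := by
          simp [loopL, hxp, PySem.Set.contains, hxs]
        rw [this, hblk, htl]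
        have hnd' : (seen ++ [x]).Nodup := by
          simp [List.nodup_append, hnd]
          intro a ha hax; exact hxs (hax ▸ ha)
        have := ih x (seen ++ [x]) hnd' (by simp)
        rw [htl] at this
        simpa using this

theorem loop_bridge : ∀ (rest hidden : List Int) (t1 : Nat) (seen : PySem.Set Int),
    1 ≤ t1 → rest = hidden.drop t1 →
    oracleLoop hidden seen t1 = loopL (hidden.getD (t1 - 1) 0) rest seen := by
  intro rest
  induction rest with
  | nil =>
    intro hidden t1 seen _ hdrop
    have hlen : hidden.length ≤ t1 := by
      by_contra hlt
      have := List.drop_eq_nil_iff.mp hdrop.symm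
      omega
    rw [oracleLoop]
    simp [loopL, Nat.not_lt.mpr hlen]
  | cons x rest' ih =>
    intro hidden t1 seen ht1 hdrop
    have hlt : t1 < hidden.length := by
      by_contra hge
      rw [List.drop_eq_nil_iff.mpr (by omega)] at hdrop
      simp at hdrop
    have hx : hidden[t1] = x := by
      have h0 : (hidden.drop t1)[0]'(by rw [← hdrop]; simp) = x := by
        simp [← hdrop]
      simpa using h0
    have hcur : PySem.List.pyGetD hidden ((t1 : Nat) : Int) 0 = hidden.getD t1 0 := by
      simp
    have hcast : ((t1 : Nat) : Int) - 1 = ((t1 - 1 : Nat) : Int) := by omega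
    have hprev : PySem.List.pyGetD hidden (((t1 : Nat) : Int) - 1) 0 = hidden.getD (t1 - 1) 0 := by
      rw [hcast]; simp
    have hgd : hidden.getD t1 0 = x := by
      rw [List.getD_eq_getElem hidden 0 hlt, hx]
    have hrec : rest' = hidden.drop (t1 + 1) := by
      have hdt : hidden.drop (t1 + 1) = (hidden.drop t1).tail := by
        rw [← List.drop_drop]; simp
      rw [hdt, ← hdrop]
      rfl
    have hsucc : t1 + 1 - 1 = t1 := by omega
    rw [oracleLoop, loopL]
    simp only [hlt, dif_pos, hcur, hprev, hgd]
    by_cases hxp : x = hidden.getD (t1 - 1) 0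
    · simp only [hxp, ne_eq, not_true_eq_false, if_false]
      have hih := ih hidden (t1 + 1) seen (by omega) hrec
      rw [hsucc, hgd] at hih
      rw [hxp] at hih
      exact hih
    · simp only [ne_eq, hxp, not_false_eq_true, if_true]
      have hih := ih hidden (t1 + 1) (PySem.Set.add seen x) (by omega) hrec
      rw [hsucc, hgd] at hih
      rw [hih]

theorem oracle_eq_nodup (hidden : List Int) (h : 2 ≤ hidden.length) :
    oracle hidden = decide (blocksRec hidden).Nodup := by
  obtain ⟨a, b, t, rfl⟩ : ∃ a b t, hidden = a :: b :: t := by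
    match hidden, h with
    | a :: b :: t, _ => exact ⟨a, b, t, rfl⟩
  have h0 : PySem.List.pyGetD (a :: b :: t) 0 0 = a := by
    simp [PySem.List.pyGetD, PySem.List.pyGet?, PySem.List.pyIdx?,
      show (0 : Int) ≤ (t.length : Int) + 1 by positivity]
  have h1 : PySem.List.pyGetD (a :: b :: t) 1 0 = b := by
    simp [PySem.List.pyGetD, PySem.List.pyGet?, PySem.List.pyIdx?]
  have hbr : oracle (a :: b :: t) =
      loopL ((a :: b :: t).getD 1 0) t
        (PySem.Set.add (PySem.Set.add PySem.Set.empty a) b) := by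
    unfold oracle
    rw [h0, h1]
    exact loop_bridge t (a :: b :: t) 2 _ (by omega) rfl
  obtain ⟨tl, htl⟩ := blocksRec_head t b
  by_cases hba : b = a
  · have hseen : PySem.Set.add (PySem.Set.add PySem.Set.empty a) b = [a] := by
      simp [PySem.Set.add, PySem.Set.contains, PySem.Set.empty, hba]
    rw [hbr, hseen]
    have hg : (a :: b :: t).getD 1 0 = b := rfl
    rw [hg]
    have := loopL_eq_nodup t b [a] (by simp) (by simp [hba])
    rw [this, htl]
    have hblk : blocksRec (a :: b :: t) = a :: tl := by
      simp [blocksRec, hba, hba ▸ htl]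
    rw [hblk]
    simp
  · have hseen : PySem.Set.add (PySem.Set.add PySem.Set.empty a) b = [a, b] := by
      simp [PySem.Set.add, PySem.Set.contains, PySem.Set.empty]
      omega
    rw [hbr, hseen]
    have hg : (a :: b :: t).getD 1 0 = b := rfl
    rw [hg]
    have := loopL_eq_nodup t b [a, b] (by simp [List.nodup_cons]; omega) (by simp)
    rw [this, htl]
    have hblk : blocksRec (a :: b :: t) = a :: b :: tl := by
      simp [blocksRec, hba, htl]
    rw [hblk]
    simp

theorem foldl_add_length_le : ∀ (l acc : List Int),
    (l.foldl PySem.Set.add acc).length ≤ acc.length + l.length := by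
  intro l
  induction l with
  | nil => intro acc; simp
  | cons x l ih =>
    intro acc
    simp only [List.foldl_cons]
    refine le_trans (ih _) ?_
    unfold PySem.Set.add
    split
    · simp
    · simp
      omega

theorem foldl_add_length_eq_iff : ∀ (l acc : List Int), acc.Nodup →
    ((l.foldl PySem.Set.add acc).length = acc.length + l.length ↔ (acc ++ l).Nodup) := by
  intro l
  induction l with
  | nil => intro acc h; simpa using h
  | cons x l ih =>
    intro acc h
    simp only [List.foldl_cons]
    by_cases hx : x ∈ acc
    · have hadd : PySem.Set.add acc x = acc := by
        unfold PySem.Set.add PySem.Set.contains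
        simp [hx]
      rw [hadd]
      constructor
      · intro hlen
        have := foldl_add_length_le l acc
        simp only [List.length_cons] at hlen
        omega
      · intro hnd
        have hd := (List.nodup_append.mp hnd).2.2
        exact absurd rfl (hd x hx x (by simp))
    · have hadd : PySem.Set.add acc x = acc ++ [x] := by
        unfold PySem.Set.add PySem.Set.contains
        simp [hx]
      rw [hadd]
      have hnd' : (acc ++ [x]).Nodup := by
        simp [List.nodup_append, h]
        intro a ha hax; exact hx (hax ▸ ha)
      have hlen : acc.length + (x :: l).length = (acc ++ [x]).length + l.length := by
        simp only [List.length_cons, List.length_append, List.length_nil]; omega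
      rw [hlen, ih _ hnd']
      have : (acc ++ [x]) ++ l = acc ++ (x :: l) := by simp
      rw [this]

theorem blocksB_eq : ∀ l : List Int,
    l.take 1 ++ ((l.zip l.tail).filterMap fun p => if p.2 ≠ p.1 then some p.2 else none)
      = blocksRec l := by
  intro l
  induction l with
  | nil => rfl
  | cons a l ih =>
    match l, ih with
    | [], _ => rfl
    | b :: t, ih =>
      by_cases hba : b = a
      · subst hba
        simp only [blocksRec, ne_eq, not_true_eq_false, if_false, List.take_succ_cons,
          List.take_zero, List.tail_cons, List.zip_cons_cons, List.filterMap_cons]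
        rw [← ih]
        simp
      · simp only [blocksRec, hba, ne_eq, not_false_eq_true, if_true, List.take_succ_cons,
          List.take_zero, List.tail_cons, List.zip_cons_cons, List.filterMap_cons]
        rw [← ih]
        simp

theorem beq_len_eq_nodup (bs : List Int) :
    (PySem.List.len bs == PySem.Set.len (PySem.Set.ofList bs)) = decide bs.Nodup := by
  have hle := foldl_add_length_le bs []
  have hiff := foldl_add_length_eq_iff bs [] (by simp)
  simp only [List.nil_append, List.length_nil, Nat.zero_add] at hle hiff
  have hofl : PySem.Set.ofList bs = bs.foldl PySem.Set.add [] := PySem.Set.ofList_eq_foldl bs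
  by_cases hn : bs.Nodup
  · have hlen : (bs.foldl PySem.Set.add []).length = bs.length := hiff.mpr hn
    simp [PySem.List.len, PySem.Set.len, hofl, hlen, hn]
  · have hlen : (bs.foldl PySem.Set.add []).length ≠ bs.length := fun he => hn (hiff.mp he)
    simp [PySem.List.len, PySem.Set.len, hofl, hn]
    omega

theorem alt_eq_nodup (hidden : List Int) :
    oracle_alt hidden = decide (blocksRec hidden).Nodup := by
  unfold oracle_alt
  have hs1 : PySem.List.slice hidden none (some 1) = hidden.take 1 := by
    rw [PySem.List.slice_to hidden (by omega)]
    rfl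
  have hs2 : PySem.List.slice hidden (some 1) none = hidden.tail := by
    rw [PySem.List.slice_from hidden (by omega)]
    simp [List.drop_one]
  rw [hs1, hs2, blocksB_eq, beq_len_eq_nodup]

-- ===== VERDICT =====
theorem oracle_spec : Claim_equal_oracle := by
  intro hidden _ hpre
  unfold Spec_oracle
  rw [oracle_eq_nodup hidden hpre, alt_eq_nodup]
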